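-- pv_equiv track=rewrite | github.com/hacatu/project-euler | 222/p222b.py | permutation_for_mask
-- ===== SOURCE A (Python) =====
-- radii = list(range(30, 51))
--
-- def permutation_for_mask(mask):
-- 	rs = radii[:2]
-- 	for r in radii[2:]:
-- 		if mask & 1:
-- 			rs.append(r)
-- 		else:
-- 			rs = [r] + rs
-- 		mask >>= 1
-- 	return rs
-- ===== SOURCE B (Python) =====
-- # Closed-form bit-indexed construction: test bit i of the original mask directly
-- # ((mask >> i) & 1) instead of consuming/shifting a running mask; two comprehensions
-- # build front (descending index scan) and back, concatenated around [30, 31].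
-- def permutation_for_mask(mask):
-- 	front = [32 + i for i in range(18, -1, -1) if not (mask >> i) & 1]
-- 	back = [32 + i for i in range(19) if (mask >> i) & 1]
-- 	return front + [30, 31] + back
-- ===== Notes on version B (the rewrite author's own statement) =====
-- stated objective: simpler
-- what changed: B replaces A's stateful loop (which consumes the mask bit by bit while growing one list by prepend/append) with a closed-form construction: two comprehensions test each bit of the original mask directly over fixed index ranges (descending for the prepended group, ascending for the appended one) and the three pieces are concatenated once.
import Mathlib
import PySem

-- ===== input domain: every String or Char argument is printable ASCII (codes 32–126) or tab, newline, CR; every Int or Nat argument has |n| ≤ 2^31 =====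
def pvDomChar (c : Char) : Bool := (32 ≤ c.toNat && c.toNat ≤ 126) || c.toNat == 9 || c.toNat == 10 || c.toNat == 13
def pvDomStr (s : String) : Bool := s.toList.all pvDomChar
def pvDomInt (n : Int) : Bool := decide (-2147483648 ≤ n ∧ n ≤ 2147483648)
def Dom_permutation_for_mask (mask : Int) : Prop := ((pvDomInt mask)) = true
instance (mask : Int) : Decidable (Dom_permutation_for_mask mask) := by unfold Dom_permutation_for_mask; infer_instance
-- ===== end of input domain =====

-- B builds the list in closed form by testing bit i of the ORIGINAL mask ((mask >> i) & 1) over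
-- fixed index ranges, instead of A's loop that consumes the mask and grows one list by
-- prepend/append (objective: simpler).

-- ===== PORT A =====
def pvRadii : List Int := PySem.List.pyRange 30 51 1

def permutation_for_mask (mask : Int) : List Int :=
  ((pvRadii.drop 2).foldl
    (fun (st : List Int × Int) r =>
      if PySem.Int.band st.2 1 ≠ 0 then (st.1 ++ [r], st.2 >>> (1:Nat))
      else ([r] ++ st.1, st.2 >>> (1:Nat)))
    (pvRadii.take 2, mask)).1

-- ===== PORT B =====
-- i ranges over 0..18 (nonnegative), so 'mask >>> i.toNat' is exactly Python's 'mask >> i'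
def permutation_for_mask_alt (mask : Int) : List Int :=
  ((PySem.List.pyRange 18 (-1) (-1)).filterMap
      (fun i => if PySem.Int.band (mask >>> i.toNat) 1 = 0 then some (32 + i) else none))
  ++ [(30:Int), 31] ++
  ((PySem.List.pyRange 0 19 1).filterMap
      (fun i => if PySem.Int.band (mask >>> i.toNat) 1 ≠ 0 then some (32 + i) else none))

-- ===== PRECONDITION & SPEC =====
def Spec_permutation_for_mask (mask : Int) (out : List Int) : Prop := out = permutation_for_mask_alt mask
instance (mask : Int) (out : List Int) : Decidable (Spec_permutation_for_mask mask out) := by unfold Spec_permutation_for_mask; infer_instance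

-- ===== CLAIM (what is proved, stated in full; the proofs are below) =====
def Claim_equal_permutation_for_mask : Prop := ∀ (mask : Int), Dom_permutation_for_mask mask → Spec_permutation_for_mask mask (permutation_for_mask mask)

-- ===== LEMMAS AND PROOFS =====

-- zeros (prepended radii) and ones (appended radii) of A's loop, in encounter order
def pvZs : List Int → Int → List Int
  | [], _ => []
  | r :: t, m => if PySem.Int.band m 1 ≠ 0 then pvZs t (m >>> (1:Nat)) else r :: pvZs t (m >>> (1:Nat))

def pvOs : List Int → Int → List Int
  | [], _ => []
  | r :: t, m => if PySem.Int.band m 1 ≠ 0 then r :: pvOs t (m >>> (1:Nat)) else pvOs t (m >>> (1:Nat))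

-- A's single growing list is always (zeros so far, reversed) ++ middle ++ (ones so far)
theorem pv_foldA (l : List Int) (m : Int) (f mid b : List Int) :
    (l.foldl
      (fun (st : List Int × Int) r =>
        if PySem.Int.band st.2 1 ≠ 0 then (st.1 ++ [r], st.2 >>> (1:Nat))
        else ([r] ++ st.1, st.2 >>> (1:Nat)))
      (f.reverse ++ mid ++ b, m)).1
    = (f ++ pvZs l m).reverse ++ mid ++ (b ++ pvOs l m) := by
  induction l generalizing m f b with
  | nil => simp [pvZs, pvOs]
  | cons r t ih =>
    by_cases h : PySem.Int.band m 1 = 0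
    · simpa [pvZs, pvOs, h, List.append_assoc] using ih (m >>> (1:Nat)) (f ++ [r]) b
    · simpa [pvZs, pvOs, h, List.append_assoc] using ih (m >>> (1:Nat)) f (b ++ [r])

-- the zeros of a consumed-and-shifted mask are exactly the indices with a clear bit
theorem pv_zs_eq (n : Nat) : ∀ (c m : Int) (j : Nat),
    pvZs ((List.range n).map (fun (k : Nat) => c + (k : Int))) (m >>> j)
    = (List.range n).filterMap
        (fun (k : Nat) => if PySem.Int.band (m >>> (j + k)) 1 = 0 then some (c + (k : Int)) else none) := by
  induction n with
  | zero => intro c m j; simp [pvZs]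
  | succ n ih =>
    intro c m j
    rw [List.range_succ_eq_map]
    have hsh : (m >>> j) >>> (1 : Nat) = m >>> (j + 1) := (Int.shiftRight_add m j 1).symm
    have hmap : List.map ((fun (k : Nat) => c + (k : Int)) ∘ Nat.succ) (List.range n)
        = List.map (fun (k : Nat) => (c + 1) + (k : Int)) (List.range n) :=
      List.map_congr_left (by intro k _; simp [Function.comp]; push_cast; ring)
    by_cases h : PySem.Int.band (m >>> j) 1 = 0 <;>
      simp [pvZs, h, List.map_cons, List.map_map, List.filterMap_map,
            hsh, hmap, ih (c + 1) m (j + 1)] <;>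
    · apply List.filterMap_congr; intro k _
      have h1 : j + (k + 1) = j + 1 + k := by omega
      by_cases hb : PySem.Int.band (m >>> (j + 1 + k)) 1 = 0 <;>
        simp [h1, hb]; ring

-- the ones are exactly the indices with a set bit
theorem pv_os_eq (n : Nat) : ∀ (c m : Int) (j : Nat),
    pvOs ((List.range n).map (fun (k : Nat) => c + (k : Int))) (m >>> j)
    = (List.range n).filterMap
        (fun (k : Nat) => if PySem.Int.band (m >>> (j + k)) 1 ≠ 0 then some (c + (k : Int)) else none) := by
  induction n with
  | zero => intro c m j; simp [pvOs]
  | succ n ih =>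
    intro c m j
    rw [List.range_succ_eq_map]
    have hsh : (m >>> j) >>> (1 : Nat) = m >>> (j + 1) := (Int.shiftRight_add m j 1).symm
    have hmap : List.map ((fun (k : Nat) => c + (k : Int)) ∘ Nat.succ) (List.range n)
        = List.map (fun (k : Nat) => (c + 1) + (k : Int)) (List.range n) :=
      List.map_congr_left (by intro k _; simp [Function.comp]; push_cast; ring)
    by_cases h : PySem.Int.band (m >>> j) 1 = 0 <;>
      simp [pvOs, h, List.map_cons, List.map_map, List.filterMap_map,
            hsh, hmap, ih (c + 1) m (j + 1)] <;>
    · apply List.filterMap_congr; intro k _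
      have h1 : j + (k + 1) = j + 1 + k := by omega
      by_cases hb : PySem.Int.band (m >>> (j + 1 + k)) 1 = 0 <;>
        simp [h1, hb]; ring

-- ===== VERDICT (by name: the statement is the Claim_ definition above) =====
set_option maxRecDepth 8192 in
theorem permutation_for_mask_spec : Claim_equal_permutation_for_mask := by
  intro mask _
  show permutation_for_mask mask = permutation_for_mask_alt mask
  unfold permutation_for_mask permutation_for_mask_alt
  have hdrop : pvRadii.drop 2 = (List.range 19).map (fun (k : Nat) => (32 : Int) + (k : Int)) := by
    decide
  have htake : pvRadii.take 2 = [(30 : Int), 31] := by decide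
  have hrF : PySem.List.pyRange 18 (-1) (-1)
      = ((List.range 19).map (fun (k : Nat) => (k : Int))).reverse := by decide
  have hrB : PySem.List.pyRange 0 19 1
      = (List.range 19).map (fun (k : Nat) => (k : Int)) := by decide
  have hA := pv_foldA (pvRadii.drop 2) mask [] [(30 : Int), 31] []
  simp only [List.reverse_nil, List.nil_append, List.append_nil] at hA
  rw [htake, hA, hdrop, hrF, hrB]
  have hz := pv_zs_eq 19 32 mask 0
  have ho := pv_os_eq 19 32 mask 0
  simp only [Int.shiftRight_zero, Nat.zero_add] at hz ho
  rw [hz, ho, List.filterMap_reverse, List.filterMap_map, List.filterMap_map]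
  congr 2
  all_goals first
    | (apply List.filterMap_congr; intro k _;
       simp [Function.comp, Int.shiftRight_natCast_right])
    | (apply congrArg; apply List.filterMap_congr; intro k _;
       simp [Function.comp, Int.shiftRight_natCast_right])
    | (funext k; simp [Function.comp, Int.shiftRight_natCast_right])
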